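-- pv_equiv track=rewrite | github.com/zalando-stups/planb-cassandra | planb/create_cluster.py | seed_iterator
-- ===== SOURCE A (Python) =====
-- MAX_SEEDS_PER_RING = 3
--
-- def seed_iterator(rings: list) -> object:
--     """For a list of rings it returns an iterator over `seed?` predicates."""
--     for ring in rings:
--         for i in range(ring['size']):
--             if i < min(ring['size'], MAX_SEEDS_PER_RING):
--                 b = True
--             else:
--                 b = False
--             yield b
-- ===== SOURCE B (Python) =====
-- MAX_SEEDS_PER_RING = 3
--
-- def seed_iterator(rings: list) -> object:
--     """For a list of rings it returns an iterator over `seed?` predicates."""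
--     if not rings:
--         return
--     ring, rest = rings[0], rings[1:]
--     left = MAX_SEEDS_PER_RING
--     remaining = ring['size']
--     while remaining > 0:
--         yield left > 0
--         left -= 1
--         remaining -= 1
--     yield from seed_iterator(rest)
-- ===== Notes on version B (the rewrite author's own statement) =====
-- stated objective: alternative
-- what changed: B is recursive on the rings list and emits each ring's flags with a countdown seeds-left counter (yield left > 0, decrementing), eliminating A's range loop, index comparison and min computation entirely.
import Mathlib
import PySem

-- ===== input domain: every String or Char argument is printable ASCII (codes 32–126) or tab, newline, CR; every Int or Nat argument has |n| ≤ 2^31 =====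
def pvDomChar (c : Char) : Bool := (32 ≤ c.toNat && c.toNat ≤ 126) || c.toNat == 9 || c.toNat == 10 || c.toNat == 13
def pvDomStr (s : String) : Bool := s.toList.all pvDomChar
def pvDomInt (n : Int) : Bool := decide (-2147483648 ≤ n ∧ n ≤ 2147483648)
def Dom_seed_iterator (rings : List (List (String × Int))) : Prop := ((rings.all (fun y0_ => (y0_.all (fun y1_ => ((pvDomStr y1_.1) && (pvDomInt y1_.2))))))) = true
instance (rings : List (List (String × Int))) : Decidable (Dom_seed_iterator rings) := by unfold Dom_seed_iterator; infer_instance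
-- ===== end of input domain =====

-- B replaces A's per-index range loop and min-comparison with recursion over the rings
-- list and a countdown seeds-left counter per ring (alternative decomposition; same cost).

-- ===== PORT A =====
-- A: for each ring, for i in range(ring['size']): yield i < min(ring['size'], 3).
-- ring['size'] = first match in the association list; the none branch (KeyError) is excluded by Pre_.
def seed_iterator (rings : List (List (String × Int))) : List Bool :=
  rings.foldl (fun acc ring =>
    match (PySem.Dict.mk ring).get? "size" with
    | none => acc   -- KeyError in Python; unreachable under Pre_seed_iterator
    | some size =>
        (PySem.List.pyRange 0 size 1).foldl
          (fun acc2 i => acc2 ++ [if i < min size 3 then true else false]) acc) []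

-- ===== PORT B =====
-- B's inner while loop: while remaining > 0: yield left > 0; left -= 1; remaining -= 1
def ringFlagsB (remaining left : Int) : List Bool :=
  if h : remaining > 0 then decide (left > 0) :: ringFlagsB (remaining - 1) (left - 1)
  else []
termination_by remaining.toNat
decreasing_by omega

-- B: recursion on the rings list; KeyError (missing 'size') is excluded by Pre_.
def seed_iterator_alt : List (List (String × Int)) → List Bool
  | [] => []
  | ring :: rest =>
    match (PySem.Dict.mk ring).get? "size" with
    | none => []   -- KeyError in Python; unreachable under Pre_seed_iterator
    | some size => ringFlagsB size 3 ++ seed_iterator_alt rest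

-- ===== PRECONDITION & SPEC =====
-- Pre_ excludes exactly the rings missing the 'size' key, on which Python A raises KeyError.
def Pre_seed_iterator (rings : List (List (String × Int))) : Prop :=
  ∀ ring ∈ rings, ((PySem.Dict.mk ring).get? "size").isSome
instance (rings : List (List (String × Int))) : Decidable (Pre_seed_iterator rings) := by
  unfold Pre_seed_iterator; infer_instance
def pvWitness_seed_iterator : (List (List (String × Int))) := [[("size", 5)], [("size", 2)]]

def Spec_seed_iterator (rings : List (List (String × Int))) (out : List Bool) : Prop := out = seed_iterator_alt rings
instance (rings : List (List (String × Int))) (out : List Bool) : Decidable (Spec_seed_iterator rings out) := by unfold Spec_seed_iterator; infer_instance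

-- ===== CLAIM (what is proved, stated in full; the proofs are below) =====
def Claim_equal_seed_iterator : Prop := ∀ (rings : List (List (String × Int))), Dom_seed_iterator rings → Pre_seed_iterator rings → Spec_seed_iterator rings (seed_iterator rings)

-- ===== LEMMAS AND PROOFS =====

-- Both per-ring computations equal a run of trues then a run of falses.
lemma nat_runs (n k : Nat) :
    (List.range n).map (fun j => decide (j < k))
    = List.replicate (min n k) true ++ List.replicate (n - k) false := by
  induction n with
  | zero => simp
  | succ n ih =>
    rw [List.range_succ, List.map_append, ih]
    by_cases h : n < k
    · have h2 : min n k = n := by omega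
      have h3 : n + 1 - k = 0 := by omega
      have h4 : n - k = 0 := by omega
      simp [h, h2, h3, h4, List.replicate_succ']
    · have h1 : min (n + 1) k = min n k := by omega
      have h2 : n + 1 - k = (n - k) + 1 := by omega
      simp [h, h1, h2, List.replicate_succ', List.append_assoc]

-- A's inner loop over one ring, for any accumulator, in run form.
lemma ring_loop_eq (size : Int) (acc : List Bool) :
    (PySem.List.pyRange 0 size 1).foldl
      (fun acc2 i => acc2 ++ [if i < min size 3 then true else false]) acc
    = acc ++ List.replicate (min size 3).toNat true
          ++ List.replicate (size - min size 3).toNat false := by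
  by_cases h : size ≤ 0
  · have h1 : (min size 3).toNat = 0 := by omega
    have h2 : (size - min size 3).toNat = 0 := by omega
    simp [PySem.List.pyRange_one_eq_nil h, h1, h2]
  · push Not at h
    rw [PySem.List.pyRange_one, PySem.List.foldl_append_singleton_eq_map, List.map_map]
    have hm : min size 3 = (((min size 3).toNat : Nat) : Int) := by omega
    have hc : ((fun i => if i < min size 3 then true else false) ∘ fun k : Nat => (0 : Int) + (k : Int))
        = fun j : Nat => decide (j < (min size 3).toNat) := by
      funext j
      simp only [Function.comp, zero_add]
      rw [hm]
      by_cases hj : (j : Int) < ((min size 3).toNat : Int) <;> simp_all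
    rw [hc, nat_runs]
    have e1 : min (size - 0).toNat (min size 3).toNat = (min size 3).toNat := by omega
    have e2 : (size - 0).toNat - (min size 3).toNat = (size - min size 3).toNat := by omega
    rw [e1, e2, List.append_assoc]

-- B's countdown loop, in the same run form (general left; called with left = 3).
lemma ringFlagsB_eq (n : Nat) : ∀ (size left : Int), size.toNat = n →
    ringFlagsB size left
    = List.replicate (min size (max left 0)).toNat true
      ++ List.replicate (size - min size (max left 0)).toNat false := by
  induction n with
  | zero =>
    intro size left hn
    have h : ¬ size > 0 := by omega
    rw [ringFlagsB, dif_neg h]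
    have h1 : (min size (max left 0)).toNat = 0 := by omega
    have h2 : (size - min size (max left 0)).toNat = 0 := by omega
    simp [h1, h2]
  | succ n ih =>
    intro size left hn
    have h : size > 0 := by omega
    rw [ringFlagsB, dif_pos h, ih (size - 1) (left - 1) (by omega)]
    by_cases hl : left > 0
    · have e1 : (min size (max left 0)).toNat
          = (min (size - 1) (max (left - 1) 0)).toNat + 1 := by omega
      have e2 : (size - 1 - min (size - 1) (max (left - 1) 0)).toNat
          = (size - min size (max left 0)).toNat := by omega
      simp [hl, e1, e2, List.replicate_succ]
    · have e1 : (min size (max left 0)).toNat = 0 := by omega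
      have e1' : (min (size - 1) (max (left - 1) 0)).toNat = 0 := by omega
      have e2 : (size - min size (max left 0)).toNat
          = (size - 1 - min (size - 1) (max (left - 1) 0)).toNat + 1 := by omega
      simp [hl, e1, e1', e2, List.replicate_succ]

-- A's fold with any accumulator equals acc ++ B's recursion, under Pre_.
lemma fold_eq_alt (rings : List (List (String × Int))) (hpre : Pre_seed_iterator rings) :
    ∀ acc : List Bool,
    rings.foldl (fun acc ring =>
      match (PySem.Dict.mk ring).get? "size" with
      | none => acc
      | some size =>
          (PySem.List.pyRange 0 size 1).foldl
            (fun acc2 i => acc2 ++ [if i < min size 3 then true else false]) acc) acc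
    = acc ++ seed_iterator_alt rings := by
  induction rings with
  | nil => intro acc; simp [seed_iterator_alt]
  | cons r rs ih =>
    intro acc
    obtain ⟨size, hs⟩ := Option.isSome_iff_exists.mp (hpre r (List.mem_cons_self ..))
    have hrest : Pre_seed_iterator rs := fun g hg => hpre g (List.mem_cons_of_mem _ hg)
    simp only [List.foldl_cons, seed_iterator_alt, hs]
    rw [ring_loop_eq, ih hrest, ringFlagsB_eq size.toNat size 3 rfl]
    simp [List.append_assoc]

-- ===== VERDICT (by name: the statement is the Claim_ definition above) =====
theorem seed_iterator_spec : Claim_equal_seed_iterator := by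
  intro rings _ hpre
  unfold Spec_seed_iterator seed_iterator
  exact fold_eq_alt rings hpre []
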